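-- pv_equiv track=rewrite | github.com/chaitanyacsss/user_similarity | utils.py | get_missing_course_tags
-- ===== SOURCE A (Python) =====
-- def get_missing_course_tags(all_course_tags, course_ids):
--     missingTag_courseTag = {}
--     for each_id in course_ids:
--         max_score_tags = None
--         max_score = 0
--         other_words = set(each_id.split("-"))
--
--         for each_tag in all_course_tags:
--             all_tag_words = each_tag.split("-")
--             curr_score = len(other_words.intersection(all_tag_words))
--             if curr_score > max_score:
--                 max_score = curr_score
--                 max_score_tags = each_tag
--         missingTag_courseTag[each_id] = max_score_tags
--     return missingTag_courseTag
-- ===== SOURCE B (Python) =====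
-- def get_missing_course_tags(all_course_tags, course_ids):
--     # Inverted index word -> ascending indices of tags containing that word,
--     # then per-id overlap counts accumulated only over matching tags.
--     index = {}
--     for j, tag in enumerate(all_course_tags):
--         for w in dict.fromkeys(tag.split("-")):
--             index.setdefault(w, []).append(j)
--     result = {}
--     for cid in course_ids:
--         counts = {}
--         for w in dict.fromkeys(cid.split("-")):
--             for j in index.get(w, []):
--                 counts[j] = counts.get(j, 0) + 1
--         best = None
--         best_c = 0
--         for j in sorted(counts):
--             c = counts[j]
--             if c > best_c:
--                 best_c = c
--                 best = j
--         result[cid] = all_course_tags[best] if best is not None else None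
--     return result
-- ===== Notes on version B (the rewrite author's own statement) =====
-- stated objective: faster
-- what changed: Replaces A's per-id scan over every tag (re-splitting each tag and intersecting word sets each time) by a precomputed inverted index word -> tag indices; per id only matching tags accumulate overlap counters and the best candidate is picked from the counter keys.
import Mathlib
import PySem

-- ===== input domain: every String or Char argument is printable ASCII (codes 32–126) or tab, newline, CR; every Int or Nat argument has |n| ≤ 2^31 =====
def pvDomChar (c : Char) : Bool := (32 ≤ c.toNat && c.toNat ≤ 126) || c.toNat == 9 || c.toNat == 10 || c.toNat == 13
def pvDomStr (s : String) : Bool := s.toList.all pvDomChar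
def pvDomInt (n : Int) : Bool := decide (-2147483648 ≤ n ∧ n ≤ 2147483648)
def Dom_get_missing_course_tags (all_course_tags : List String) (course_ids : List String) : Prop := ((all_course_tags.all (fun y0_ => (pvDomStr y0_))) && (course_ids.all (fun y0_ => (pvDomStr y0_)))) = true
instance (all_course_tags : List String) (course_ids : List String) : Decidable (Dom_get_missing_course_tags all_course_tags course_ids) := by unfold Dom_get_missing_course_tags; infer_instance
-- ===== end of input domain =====

-- B replaces A's per-id scan of every tag by an inverted index word → tag indices with
-- per-candidate overlap counters (objective: faster, asymptotically fewer tag visits).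

-- shared primitive: s.split("-"); the separator "-" is nonempty, so PySem.Str.split? is always `some`
def pvSplitDash (s : String) : List String := (PySem.Str.split? s "-").getD []

-- ===== PORT A =====
def get_missing_course_tags (all_course_tags : List String) (course_ids : List String) : List (String × Option String) :=
  (course_ids.foldl (fun missingTag_courseTag each_id =>
      let other_words : PySem.Set String := PySem.Set.ofList (pvSplitDash each_id)
      let r := all_course_tags.foldl (fun (st : Option String × Int) each_tag =>
          let all_tag_words := pvSplitDash each_tag
          let curr_score : Int := PySem.Set.len (PySem.Set.inter other_words all_tag_words)
          if curr_score > st.2 then (some each_tag, curr_score) else st)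
        (none, 0)
      missingTag_courseTag.insert each_id r.1)
    PySem.Dict.empty).items

-- ===== PORT B =====
-- index.setdefault(w, []).append(j)  ==  index[w] = index.get(w, []) + [j]  ==  Dict.modify
def gmct_index (all_course_tags : List String) : PySem.Dict String (List Int) :=
  (PySem.List.enumerate all_course_tags).foldl (fun index p =>
      (PySem.List.dedup (pvSplitDash p.2)).foldl (fun index w =>
          index.modify w [] (fun l => l ++ [p.1])) index)
    PySem.Dict.empty

def gmct_best (all_course_tags : List String) (index : PySem.Dict String (List Int)) (cid : String) : Option String :=
  let counts : PySem.Dict Int Int :=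
    (PySem.List.dedup (pvSplitDash cid)).foldl (fun counts w =>
        (index.getD w []).foldl (fun counts j => counts.insert j (counts.getD j 0 + 1)) counts)
      PySem.Dict.empty
  let r := (PySem.List.sorted counts.keys (fun x => x)).foldl
      (fun (st : Option Int × Int) j =>
        let c := counts.getD j 0            -- counts[j]: j ∈ counts.keys, the default is never taken
        if c > st.2 then (some j, c) else st)
      (none, 0)
  match r.1 with
  | none => none
  | some best => PySem.List.pyGet? all_course_tags best   -- all_course_tags[best]: best is a valid index, so pyGet? = some _

def get_missing_course_tags_alt (all_course_tags : List String) (course_ids : List String) : List (String × Option String) :=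
  let index := gmct_index all_course_tags
  (course_ids.foldl (fun result cid => result.insert cid (gmct_best all_course_tags index cid))
    PySem.Dict.empty).items

-- ===== PRECONDITION & SPEC =====
def Spec_get_missing_course_tags (all_course_tags : List String) (course_ids : List String) (out : List (String × Option String)) : Prop := out = get_missing_course_tags_alt all_course_tags course_ids
instance (all_course_tags : List String) (course_ids : List String) (out : List (String × Option String)) : Decidable (Spec_get_missing_course_tags all_course_tags course_ids out) := by unfold Spec_get_missing_course_tags; infer_instance

-- ===== CLAIM (what is proved, stated in full; the proofs are below) =====
def Claim_equal_get_missing_course_tags : Prop := ∀ (all_course_tags : List String) (course_ids : List String), Dom_get_missing_course_tags all_course_tags course_ids → Spec_get_missing_course_tags all_course_tags course_ids (get_missing_course_tags all_course_tags course_ids)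


-- ===== LEMMAS AND PROOFS =====

-- the tag at index j (A's fold runs over the tags themselves; pyGetD names them by index)
def gmGet (ats : List String) (j : Int) : String := PySem.List.pyGetD ats j ""

-- A's per-id score of a tag
def gmScore (cid t : String) : Int :=
  PySem.Set.len (PySem.Set.inter (PySem.Set.ofList (pvSplitDash cid)) (pvSplitDash t))

theorem gm_flat_filter (w : String) (l : List (Int × String)) :
    ((l.flatMap (fun p => (PySem.List.dedup (pvSplitDash p.2)).map (fun w' => (w', p.1)))).filter
        (fun q => q.1 == w)).map (fun q => q.2)
      = (l.filter (fun p => decide (w ∈ pvSplitDash p.2))).map (fun p => p.1) := by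
  induction l with
  | nil => rfl
  | cons p l ih =>
    rw [List.flatMap_cons, List.filter_append, List.map_append, ih]
    have hhead : (((PySem.List.dedup (pvSplitDash p.2)).map (fun w' => (w', p.1))).filter
        (fun q => q.1 == w)).map (fun q => q.2)
        = if w ∈ pvSplitDash p.2 then [p.1] else [] := by
      rw [List.filter_map, List.map_map]
      have h2 : (PySem.List.dedup (pvSplitDash p.2)).filter
          ((fun q : String × Int => q.1 == w) ∘ (fun w' => (w', p.1)))
          = List.replicate (List.count w (PySem.List.dedup (pvSplitDash p.2))) w := by
        have hcg := List.filter_congr (l := PySem.List.dedup (pvSplitDash p.2))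
          (p := (fun q : String × Int => q.1 == w) ∘ fun w' => (w', p.1))
          (q := fun x => x == w) (fun x _ => rfl)
        rw [hcg]
        exact List.filter_beq w
      rw [h2]
      by_cases hw : w ∈ pvSplitDash p.2
      · rw [List.count_eq_one_of_mem (PySem.List.nodup_dedup _) ((PySem.List.mem_dedup _ _).mpr hw)]
        simp [hw]
      · rw [List.count_eq_zero_of_not_mem (fun hc => hw ((PySem.List.mem_dedup _ _).mp hc))]
        simp [hw]
    rw [hhead]
    by_cases hw : w ∈ pvSplitDash p.2
    · rw [List.filter_cons_of_pos (by simpa using hw), List.map_cons, if_pos hw]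
      rfl
    · rw [List.filter_cons_of_neg (by simpa using hw), if_neg hw]
      simp

theorem gmct_index_getD (ats : List String) (w : String) :
    (gmct_index ats).getD w []
      = ((PySem.List.enumerate ats).filter (fun p => decide (w ∈ pvSplitDash p.2))).map (fun p => p.1) := by
  have h1 : gmct_index ats
      = ((PySem.List.enumerate ats).flatMap
            (fun p => (PySem.List.dedup (pvSplitDash p.2)).map (fun w' => (w', p.1)))).foldl
          (fun d q => d.modify q.1 [] (fun l => l ++ [q.2])) PySem.Dict.empty := by
    rw [List.foldl_flatMap]
    unfold gmct_index
    congr 1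
    funext d p
    rw [List.foldl_map]
  rw [h1, PySem.Dict.getD_foldl_modify_append, gm_flat_filter]
  simp

theorem gmct_index_mem (ats : List String) (w : String) (j : Int) :
    j ∈ (gmct_index ats).getD w []
      ↔ ∃ (k : Nat) (_ : k < ats.length), j = (k : Int) ∧ w ∈ pvSplitDash ats[k] := by
  rw [gmct_index_getD]
  simp only [List.mem_map, List.mem_filter, PySem.List.mem_enumerate_iff]
  constructor
  · rintro ⟨p, ⟨⟨k, hk, rfl⟩, hw⟩, rfl⟩
    exact ⟨k, hk, by simp, by simpa using hw⟩
  · rintro ⟨k, hk, rfl, hw⟩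
    exact ⟨((k : Int), ats[k]), ⟨⟨k, hk, by simp⟩, by simpa using hw⟩, rfl⟩

theorem gmct_index_nodup (ats : List String) (w : String) :
    ((gmct_index ats).getD w []).Nodup := by
  rw [gmct_index_getD]
  exact List.Pairwise.map _ (fun a b h => Int.ne_of_lt h)
    ((PySem.List.pairwise_lt_enumerate ats 0).filter _)

theorem gmct_index_count (ats : List String) (w : String) (j : Int)
    (h0 : 0 ≤ j) (h1 : j < (ats.length : Int)) :
    ((gmct_index ats).getD w []).count j
      = if w ∈ pvSplitDash (gmGet ats j) then 1 else 0 := by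
  have hget : gmGet ats j = ats[j.toNat]'(by omega) :=
    PySem.List.pyGetD_eq_getElem ats "" h0 h1
  by_cases hm : j ∈ (gmct_index ats).getD w []
  · rw [List.count_eq_one_of_mem (gmct_index_nodup ats w) hm, if_pos]
    obtain ⟨k, hk, hj, hw⟩ := (gmct_index_mem ats w j).mp hm
    have : j.toNat = k := by omega
    rw [hget]
    simpa [this] using hw
  · rw [List.count_eq_zero_of_not_mem hm, if_neg]
    intro hw
    refine hm ((gmct_index_mem ats w j).mpr ⟨j.toNat, by omega, by omega, ?_⟩)
    rwa [hget] at hw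

theorem gm_sum_ite (p : String → Bool) (l : List String) :
    (l.map (fun w => if p w then (1 : Nat) else 0)).sum = l.countP p := by
  induction l with
  | nil => rfl
  | cons w l ih =>
    by_cases h : p w <;> simp [h, ih, Nat.add_comm]

theorem gmct_count_eq_score (ats : List String) (cid : String) (j : Int)
    (h0 : 0 ≤ j) (h1 : j < (ats.length : Int)) :
    ((((PySem.List.dedup (pvSplitDash cid)).flatMap
        (fun w => (gmct_index ats).getD w [])).count j : Int))
      = gmScore cid (gmGet ats j) := by
  rw [List.count_flatMap]
  have hmap : (PySem.List.dedup (pvSplitDash cid)).map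
        (List.count j ∘ fun w => (gmct_index ats).getD w [])
      = (PySem.List.dedup (pvSplitDash cid)).map
        (fun w => if (fun w => decide (w ∈ pvSplitDash (gmGet ats j))) w then (1 : Nat) else 0) := by
    refine List.map_congr_left (fun w _ => ?_)
    simpa using gmct_index_count ats w j h0 h1
  rw [hmap, gm_sum_ite, List.countP_eq_length_filter]
  unfold gmScore PySem.Set.len PySem.Set.inter
  rw [← PySem.List.dedup_eq_ofList (pvSplitDash cid)]
  congr 2
  refine List.filter_congr (fun w _ => ?_)
  simp [PySem.Set.contains_eq_listContains, gmGet]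

theorem gm_skip (g : Int → String) (f : Int → Int) (js : List Int) :
    ∀ st : Option String × Int, 0 ≤ st.2 →
    js.foldl (fun st j => if f j > st.2 then (some (g j), f j) else st) st
      = (js.filter (fun j => decide (0 < f j))).foldl
          (fun st j => if f j > st.2 then (some (g j), f j) else st) st := by
  induction js with
  | nil => intro st _; rfl
  | cons j js ih =>
    intro st hst
    by_cases hf : 0 < f j
    · rw [List.filter_cons_of_pos (by simpa using hf)]
      simp only [List.foldl_cons]
      apply ih
      by_cases hc : f j > st.2
      · rw [if_pos hc]; exact le_of_lt hf
      · rw [if_neg hc]; exact hst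
    · rw [List.filter_cons_of_neg (by simpa using hf)]
      simp only [List.foldl_cons]
      rw [if_neg (by omega)]
      exact ih st hst

theorem gm_sim (g : Int → String) (f c : Int → Int) (js : List Int)
    (hfc : ∀ j ∈ js, c j = f j) :
    ∀ (a : Option String × Int) (b : Option Int × Int), a.2 = b.2 → a.1 = b.1.map g →
    js.foldl (fun st j => if f j > st.2 then (some (g j), f j) else st) a
      = ((js.foldl (fun st j => if c j > st.2 then (some j, c j) else st) b).1.map g,
         (js.foldl (fun st j => if c j > st.2 then (some j, c j) else st) b).2) := by
  induction js with
  | nil =>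
    intro a b h1 h2
    cases a; cases b; simp_all
  | cons j js ih =>
    intro a b h1 h2
    have hc := hfc j (List.mem_cons_self ..)
    simp only [List.foldl_cons]
    by_cases hgt : f j > a.2
    · rw [if_pos hgt, if_pos (by rw [hc, ← h1]; exact hgt)]
      exact ih (fun j hj => hfc j (List.mem_cons_of_mem _ hj)) _ _ hc.symm rfl
    · rw [if_neg hgt, if_neg (by rw [hc, ← h1]; exact hgt)]
      exact ih (fun j hj => hfc j (List.mem_cons_of_mem _ hj)) _ _ h1 h2

theorem gm_fold_mem (c : Int → Int) (js : List Int) :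
    ∀ b : Option Int × Int,
    (js.foldl (fun st j => if c j > st.2 then (some j, c j) else st) b).1 = b.1
      ∨ ∃ j ∈ js, (js.foldl (fun st j => if c j > st.2 then (some j, c j) else st) b).1 = some j := by
  induction js with
  | nil => intro b; exact Or.inl rfl
  | cons j js ih =>
    intro b
    simp only [List.foldl_cons]
    by_cases h : c j > b.2
    · rw [if_pos h]
      rcases ih (some j, c j) with h' | ⟨j', hj', h'⟩
      · exact Or.inr ⟨j, List.mem_cons_self .., h'⟩
      · exact Or.inr ⟨j', List.mem_cons_of_mem _ hj', h'⟩
    · rw [if_neg h]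
      rcases ih b with h' | ⟨j', hj', h'⟩
      · exact Or.inl h'
      · exact Or.inr ⟨j', List.mem_cons_of_mem _ hj', h'⟩

theorem gmA_fold (ats : List String) (cid : String) :
    ats.foldl (fun (st : Option String × Int) each_tag =>
        let all_tag_words := pvSplitDash each_tag
        let curr_score : Int := PySem.Set.len (PySem.Set.inter (PySem.Set.ofList (pvSplitDash cid)) all_tag_words)
        if curr_score > st.2 then (some each_tag, curr_score) else st) (none, 0)
      = (PySem.List.pyRange 0 (PySem.List.len ats)).foldl
          (fun (st : Option String × Int) j =>
            if gmScore cid (gmGet ats j) > st.2 then (some (gmGet ats j), gmScore cid (gmGet ats j)) else st)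
          (none, 0) := by
  conv_lhs => rw [← PySem.List.map_pyGetD_pyRange_zero ats ""]
  rw [List.foldl_map]
  rfl

theorem gmct_best_eq (ats : List String) (cid : String) :
    gmct_best ats (gmct_index ats) cid
      = (ats.foldl (fun (st : Option String × Int) each_tag =>
          let all_tag_words := pvSplitDash each_tag
          let curr_score : Int := PySem.Set.len (PySem.Set.inter (PySem.Set.ofList (pvSplitDash cid)) all_tag_words)
          if curr_score > st.2 then (some each_tag, curr_score) else st)
        (none, 0)).1 := by
  have hcounts :
      (PySem.List.dedup (pvSplitDash cid)).foldl
        (fun counts w => ((gmct_index ats).getD w []).foldl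
            (fun counts j => counts.insert j (counts.getD j 0 + 1)) counts)
        PySem.Dict.empty
      = PySem.Dict.counter
          ((PySem.List.dedup (pvSplitDash cid)).flatMap (fun w => (gmct_index ats).getD w [])) := by
    rw [← PySem.Dict.foldl_insert_getD_add_one_eq_counter, List.foldl_flatMap]
  unfold gmct_best
  rw [hcounts]
  set L := (PySem.List.dedup (pvSplitDash cid)).flatMap (fun w => (gmct_index ats).getD w []) with hLdef
  simp only [PySem.Dict.keys_counter, PySem.Dict.getD_counter]
  have hmemL : ∀ j : Int, j ∈ L ↔ 0 ≤ j ∧ j < (ats.length : Int) ∧ 0 < gmScore cid (gmGet ats j) := by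
    intro j
    constructor
    · intro hj
      obtain ⟨w, hw, hji⟩ := List.mem_flatMap.mp hj
      obtain ⟨k, hk, rfl, hwk⟩ := (gmct_index_mem ats w j).mp hji
      have h0 : (0 : Int) ≤ (k : Int) := Int.natCast_nonneg k
      have h1 : (k : Int) < (ats.length : Int) := by exact_mod_cast hk
      refine ⟨h0, h1, ?_⟩
      rw [← gmct_count_eq_score ats cid _ h0 h1]
      exact_mod_cast List.count_pos_iff.mpr hj
    · rintro ⟨h0, h1, hsc⟩
      rw [← gmct_count_eq_score ats cid j h0 h1] at hsc
      exact List.count_pos_iff.mp (by exact_mod_cast hsc)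
  have hsorted : PySem.List.sorted (PySem.Set.ofList L) (fun x => x)
      = (PySem.List.pyRange 0 (PySem.List.len ats)).filter
          (fun j => decide (0 < gmScore cid (gmGet ats j))) := by
    apply PySem.List.sorted_eq_of_perm_of_pairwise_lt
    · have hp : List.Pairwise (· < ·) (PySem.List.pyRange 0 (PySem.List.len ats)) := by
        simp [PySem.List.pairwise_lt_pyRange_one]
      refine (List.perm_ext_iff_of_nodup ?_ (PySem.Set.nodup_ofList L)).mpr ?_
      · exact (hp.filter _).imp (fun h => ne_of_lt h)
      · intro j
        rw [List.mem_filter, PySem.Set.mem_ofList, hmemL j, PySem.List.mem_pyRange_one]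
        simp only [PySem.List.len, decide_eq_true_eq]
        constructor
        · rintro ⟨⟨ha, hb⟩, hc⟩; exact ⟨ha, hb, hc⟩
        · rintro ⟨ha, hb, hc⟩; exact ⟨⟨ha, hb⟩, hc⟩
    · have hp : List.Pairwise (· < ·) (PySem.List.pyRange 0 (PySem.List.len ats)) := by
        simp [PySem.List.pairwise_lt_pyRange_one]
      exact hp.filter _
  rw [hsorted]
  rw [gmA_fold, gm_skip (gmGet ats) (fun j => gmScore cid (gmGet ats j)) _ (none, 0) le_rfl]
  have hfc : ∀ j ∈ (PySem.List.pyRange 0 (PySem.List.len ats)).filter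
      (fun j => decide (0 < gmScore cid (gmGet ats j))),
      ((L.count j : Int)) = gmScore cid (gmGet ats j) := by
    intro j hj
    rw [List.mem_filter, PySem.List.mem_pyRange_one] at hj
    exact gmct_count_eq_score ats cid j hj.1.1 (by simpa [PySem.List.len] using hj.1.2)
  rw [gm_sim (gmGet ats) (fun j => gmScore cid (gmGet ats j)) (fun j => ((L.count j : Int))) _ hfc (none, 0) (none, 0) rfl rfl]
  set js := (PySem.List.pyRange 0 (PySem.List.len ats)).filter
      (fun j => decide (0 < gmScore cid (gmGet ats j))) with hjs
  set b := js.foldl (fun (st : Option Int × Int) j =>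
      if ((L.count j : Int)) > st.2 then (some j, ((L.count j : Int))) else st) (none, 0) with hb
  cases hb1 : b.1 with
  | none => simp
  | some j =>
    have hjmem : j ∈ js := by
      rcases gm_fold_mem (fun j => ((L.count j : Int))) js (none, 0) with h' | ⟨j', hj', h'⟩
      · rw [← hb] at h'; rw [hb1] at h'; cases h'
      · rw [← hb] at h'; rw [hb1] at h'; cases h'; exact hj'
    rw [List.mem_filter, PySem.List.mem_pyRange_one] at hjmem
    have h0 : 0 ≤ j := hjmem.1.1
    have h1 : j < (ats.length : Int) := by simpa [PySem.List.len] using hjmem.1.2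
    simp only [Option.map_some]
    rw [PySem.List.pyGet?_of_nonneg ats h0, List.getElem?_eq_getElem (by omega)]
    simp only [gmGet]
    rw [PySem.List.pyGetD_eq_getElem ats "" h0 h1]

-- ===== VERDICT (by name: the statement is the Claim_ definition above) =====
theorem get_missing_course_tags_spec : Claim_equal_get_missing_course_tags := by
  intro ats cids _
  unfold Spec_get_missing_course_tags get_missing_course_tags get_missing_course_tags_alt
  dsimp only
  congr 1
  apply PySem.List.foldl_congr_mem
  intro acc cid _
  rw [gmct_best_eq]
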